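-- pv_equiv track=rewrite | github.com/Yankovsky/yandex-algos-training | hw8/f.py | nodes_with_two_children
-- ===== SOURCE A (Python) =====
-- class BSTNode:
--     def __init__(self, key=None):
--         self.key = key
--         self.left = None
--         self.right = None
--
--     def insert_recursive(self, key):
--         if self.key is None:
--             self.key = key
--             return self
--
--         if key == self.key:
--             return self
--
--         if key < self.key:
--             if self.left:
--                 return self.left.insert_recursive(key)
--             self.left = BSTNode(key)
--             return self.left
--
--         if self.right:
--             return self.right.insert_recursive(key)
--         self.right = BSTNode(key)
--         return self.right
--
--     def traverse(self, func):
--         if self.left: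
--             self.left.traverse(func)
--         func(self)
--         if self.right:
--             self.right.traverse(func)
--
-- def nodes_with_two_children(keys):
--     bst = BSTNode()
--     for key in keys:
--         bst.insert_recursive(key)
--
--     results = []
--
--     def append_node_with_two_children(node):
--         if node.left and node.right:
--             results.append(node.key)
--
--     bst.traverse(append_node_with_two_children)
--     return results
-- ===== SOURCE B (Python) =====
-- def nodes_with_two_children(keys):
--     # Flat alternative to the BST: keep a sorted list of [key, has_left, has_right]
--     # entries.  A new key's parent in the insertion BST is whichever of its two
--     # sorted neighbours was inserted later; equivalently, the predecessor adopts it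
--     # as right child when its right slot is still free, otherwise the successor
--     # adopts it as left child.
--     nodes = []  # sorted by key
--     for k in keys:
--         lo, hi = 0, len(nodes)
--         while lo < hi:
--             mid = (lo + hi) // 2
--             if nodes[mid][0] < k:
--                 lo = mid + 1
--             else:
--                 hi = mid
--         if lo < len(nodes) and nodes[lo][0] == k:
--             continue  # duplicate: the BST ignores it
--         if lo > 0 and not nodes[lo - 1][2]:
--             nodes[lo - 1][2] = True
--         elif lo < len(nodes):
--             nodes[lo][1] = True
--         nodes.insert(lo, [k, False, False])
--     return [key for key, left, right in nodes if left and right]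
-- ===== Notes on version B (the rewrite author's own statement) =====
-- stated objective: alternative
-- what changed: Replaces the pointer-based BST (recursive insert plus recursive in-order traversal) by a flat sorted list of (key, has_left, has_right) entries maintained with an iterative binary search, using the fact that a new key becomes the right child of its sorted predecessor when that slot is free and otherwise the left child of its successor.
import Mathlib
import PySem

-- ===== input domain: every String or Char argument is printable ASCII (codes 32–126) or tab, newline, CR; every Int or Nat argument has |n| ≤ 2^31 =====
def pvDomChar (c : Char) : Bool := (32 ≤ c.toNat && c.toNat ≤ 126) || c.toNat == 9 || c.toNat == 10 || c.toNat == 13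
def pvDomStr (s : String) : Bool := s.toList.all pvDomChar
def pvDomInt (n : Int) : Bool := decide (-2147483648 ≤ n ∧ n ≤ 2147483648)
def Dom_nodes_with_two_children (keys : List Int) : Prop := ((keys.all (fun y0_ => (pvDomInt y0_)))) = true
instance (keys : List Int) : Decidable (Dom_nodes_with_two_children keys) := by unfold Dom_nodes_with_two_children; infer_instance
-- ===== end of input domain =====

-- B replaces A's node-object BST with a flat sorted list of (key, has_left, has_right)
-- entries maintained by binary search (objective: alternative algorithm, no recursion).

-- ===== PORT A =====
-- A builds a BST by repeated `insert_recursive` and collects, in order, the keys of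
-- nodes with two children.  The empty root (key=None) behaves like the empty tree.
inductive BTree where
  | leaf : BTree
  | node : BTree → Int → BTree → BTree
deriving DecidableEq, Repr

def insertT : BTree → Int → BTree
  | .leaf, k => .node .leaf k .leaf
  | .node l x r, k =>
    if k = x then .node l x r
    else if k < x then .node (insertT l k) x r
    else .node l x (insertT r k)

def isNode : BTree → Bool
  | .leaf => false
  | .node _ _ _ => true

-- A's in-order traverse with the append_node_with_two_children callback
def collectTwo : BTree → List Int
  | .leaf => []
  | .node l x r => collectTwo l ++ (if isNode l && isNode r then [x] else []) ++ collectTwo r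

def nodes_with_two_children (keys : List Int) : List Int :=
  collectTwo (keys.foldl insertT .leaf)

-- ===== PORT B =====
-- nodes[i] = (key, has_left, has_right); the python `nodes[lo-1][2] = True` / `nodes[lo][1] = True`
def setR (p : Int × Bool × Bool) : Int × Bool × Bool := (p.1, p.2.1, true)
def setL (p : Int × Bool × Bool) : Int × Bool × Bool := (p.1, true, p.2.2)

-- the `while lo < hi` binary-search loop of Source B (indexing is always in range; getD is exact there)
def bfind (nodes : List (Int × Bool × Bool)) (k : Int) (lo hi : Nat) : Nat :=
  if lo < hi then
    let mid := (lo + hi) / 2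
    if (nodes.getD mid (0, false, false)).1 < k then bfind nodes k (mid + 1) hi
    else bfind nodes k lo mid
  else lo
  termination_by hi - lo
  decreasing_by all_goals omega

-- one iteration of Source B's `for k in keys` loop body
def bstep (nodes : List (Int × Bool × Bool)) (k : Int) : List (Int × Bool × Bool) :=
  let lo := bfind nodes k 0 nodes.length
  if lo < nodes.length ∧ (nodes.getD lo (0, false, false)).1 = k then nodes
  else
    let nodes1 :=
      if 0 < lo ∧ (nodes.getD (lo - 1) (0, false, false)).2.2 = false then
        nodes.modify (lo - 1) setR
      else if lo < nodes.length then nodes.modify lo setL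
      else nodes
    nodes1.insertIdx lo (k, false, false)

def nodes_with_two_children_alt (keys : List Int) : List Int :=
  (keys.foldl bstep []).filterMap (fun p => if p.2.1 && p.2.2 then some p.1 else none)

-- ===== PRECONDITION & SPEC =====
def Spec_nodes_with_two_children (keys : List Int) (out : List Int) : Prop := out = nodes_with_two_children_alt keys
instance (keys : List Int) (out : List Int) : Decidable (Spec_nodes_with_two_children keys out) := by unfold Spec_nodes_with_two_children; infer_instance

-- ===== CLAIM (what is proved, stated in full; the proofs are below) =====
def Claim_equal_nodes_with_two_children : Prop := ∀ (keys : List Int), Dom_nodes_with_two_children keys → Spec_nodes_with_two_children keys (nodes_with_two_children keys)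

-- ===== LEMMAS AND PROOFS =====

-- reference single-pass version of bstep, used only in the proofs
def stepGo (p : Int × Bool × Bool) : List (Int × Bool × Bool) → Int → List (Int × Bool × Bool)
  | [], k => if p.2.2 then [p, (k, false, false)] else [setR p, (k, false, false)]
  | q :: rs, k =>
    if k = q.1 then p :: q :: rs
    else if k < q.1 then
      (if p.2.2 then p :: (k, false, false) :: setL q :: rs
       else setR p :: (k, false, false) :: q :: rs)
    else p :: stepGo q rs k

def step : List (Int × Bool × Bool) → Int → List (Int × Bool × Bool)
  | [], k => [(k, false, false)]
  | p :: rest, k =>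
    if k = p.1 then p :: rest
    else if k < p.1 then (k, false, false) :: setL p :: rest
    else stepGo p rest k

def keysOf (L : List (Int × Bool × Bool)) : List Int := L.map (·.1)

def lb (L : List (Int × Bool × Bool)) (k : Int) : Nat :=
  (L.takeWhile (fun p => decide (p.1 < k))).length

def kAt (L : List (Int × Bool × Bool)) (i : Nat) : Int := (L.getD i (0, false, false)).1

-- in-order list of (key, has_left, has_right) of a tree
def flags : BTree → List (Int × Bool × Bool)
  | .leaf => []
  | .node l x r => flags l ++ (x, isNode l, isNode r) :: flags r

lemma lb_nil (k : Int) : lb [] k = 0 := rfl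

lemma lb_cons (p : Int × Bool × Bool) (L : List (Int × Bool × Bool)) (k : Int) :
    lb (p :: L) k = if p.1 < k then lb L k + 1 else 0 := by
  simp [lb, List.takeWhile]; split <;> simp_all

lemma lb_le_length (L : List (Int × Bool × Bool)) (k : Int) : lb L k ≤ L.length := by
  simpa [lb] using (List.takeWhile_sublist _).length_le

lemma lb_lt_key (L : List (Int × Bool × Bool)) (k : Int) :
    ∀ i, i < lb L k → kAt L i < k := by
  induction L with
  | nil => simp [lb_nil]
  | cons p L ih =>
    intro i hi
    rw [lb_cons] at hi
    split at hi
    · cases i with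
      | zero => simpa [kAt] using ‹p.1 < k›
      | succ j => simpa [kAt, List.getD_cons_succ] using ih j (by omega)
    · omega

lemma lb_stop (L : List (Int × Bool × Bool)) (k : Int) :
    lb L k < L.length → ¬ kAt L (lb L k) < k := by
  induction L with
  | nil => simp [lb_nil]
  | cons p L ih =>
    rw [lb_cons]
    split
    · intro h
      simpa [kAt, List.getD_cons_succ] using ih (by simpa using h)
    · intro _
      simpa [kAt] using ‹¬ p.1 < k›

lemma lb_unique (L : List (Int × Bool × Bool)) (k : Int) (n : Nat)
    (h1 : n ≤ L.length) (h2 : ∀ i, i < n → kAt L i < k)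
    (h3 : n < L.length → ¬ kAt L n < k) : n = lb L k := by
  rcases Nat.lt_trichotomy n (lb L k) with h | h | h
  · exact absurd (lb_lt_key L k n h) (h3 (lt_of_lt_of_le h (lb_le_length L k)))
  · exact h
  · exact absurd (h2 _ h) (lb_stop L k (lt_of_lt_of_le h h1))

lemma kAt_mono (L : List (Int × Bool × Bool))
    (hs : (keysOf L).Pairwise (· ≤ ·)) {i j : Nat} (hij : i ≤ j) (hj : j < L.length) :
    kAt L i ≤ kAt L j := by
  rcases eq_or_lt_of_le hij with rfl | h
  · exact le_refl _
  · have hi : i < L.length := lt_of_lt_of_le (lt_of_lt_of_le h (le_of_lt hj)) (le_refl _)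
    have := List.pairwise_iff_getElem.1 hs i j
      (by simpa [keysOf] using hi) (by simpa [keysOf] using hj) h
    simpa [keysOf, kAt, List.getD_eq_getElem, hi, hj] using this

lemma bfind_aux (L : List (Int × Bool × Bool)) (k : Int)
    (hs : (keysOf L).Pairwise (· ≤ ·)) :
    ∀ n lo hi, hi - lo ≤ n → lo ≤ hi → hi ≤ L.length →
      (∀ i, i < lo → kAt L i < k) →
      (∀ i, hi ≤ i → i < L.length → ¬ kAt L i < k) →
      bfind L k lo hi = lb L k := by
  intro n
  induction n with
  | zero =>
    intro lo hi h hle hhiL hlo hhi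
    unfold bfind
    rw [if_neg (by omega)]
    exact lb_unique L k lo (by omega) hlo (fun h' => hhi lo (by omega) h')
  | succ m ih =>
    intro lo hi h hle hhiL hlo hhi
    unfold bfind
    by_cases hlt : lo < hi
    · rw [if_pos hlt]
      by_cases hc : (L.getD ((lo + hi) / 2) (0, false, false)).1 < k
      · rw [if_pos hc]
        refine ih ((lo + hi) / 2 + 1) hi (by omega) (by omega) hhiL ?_ hhi
        intro i hi'
        by_cases hio : i < lo
        · exact hlo i hio
        · have h1 : i < L.length := by omega
          have h2 : kAt L i ≤ kAt L ((lo + hi) / 2) :=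
            kAt_mono L hs (by omega) (by omega)
          exact lt_of_le_of_lt h2 (by simpa [kAt] using hc)
      · rw [if_neg hc]
        refine ih lo ((lo + hi) / 2) (by omega) (by omega) (by omega) hlo ?_
        intro i hmi hiL hik
        have h2 : kAt L ((lo + hi) / 2) ≤ kAt L i := kAt_mono L hs hmi hiL
        exact hc (by simpa [kAt] using lt_of_le_of_lt h2 hik)
    · rw [if_neg hlt]
      exact lb_unique L k lo (by omega) hlo (fun h' => hhi lo (by omega) h')

lemma bfind_eq_lb (L : List (Int × Bool × Bool)) (k : Int)
    (hs : (keysOf L).Pairwise (· < ·)) :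
    bfind L k 0 L.length = lb L k := by
  refine bfind_aux L k (hs.imp le_of_lt) L.length 0 L.length (by omega) (by omega)
    (le_refl _) (by omega) (by omega)

-- positional version of one loop iteration
def pstep (L : List (Int × Bool × Bool)) (k : Int) : List (Int × Bool × Bool) :=
  let lo := lb L k
  if lo < L.length ∧ kAt L lo = k then L
  else
    let L1 :=
      if 0 < lo ∧ (L.getD (lo - 1) (0, false, false)).2.2 = false then
        L.modify (lo - 1) setR
      else if lo < L.length then L.modify lo setL
      else L
    L1.insertIdx lo (k, false, false)

lemma bstep_eq_pstep (L : List (Int × Bool × Bool)) (k : Int)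
    (hs : (keysOf L).Pairwise (· < ·)) : bstep L k = pstep L k := by
  simp only [bstep, pstep, bfind_eq_lb L k hs, kAt]

lemma kAt_cons_succ (p : Int × Bool × Bool) (L : List (Int × Bool × Bool)) (i : Nat) :
    kAt (p :: L) (i + 1) = kAt L i := by simp [kAt]

lemma pstep_cons_big (p : Int × Bool × Bool) (rest : List (Int × Bool × Bool)) (k : Int)
    (hx : p.1 < k) (h : 0 < lb rest k) :
    pstep (p :: rest) k = p :: pstep rest k := by
  have hlb : lb (p :: rest) k = lb rest k + 1 := by rw [lb_cons, if_pos hx]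
  obtain ⟨n, hn⟩ : ∃ n, lb rest k = n + 1 := ⟨lb rest k - 1, by omega⟩
  simp only [pstep, hlb, hn, List.length_cons, Nat.add_sub_cancel, kAt_cons_succ,
    List.getD_cons_succ]
  split_ifs <;>
    solve
        | rfl
        | omega
        | (exfalso; simp_all)
        | simp_all [List.modify_cons, List.insertIdx_succ_cons, List.insertIdx_zero, setL, setR, Nat.add_sub_cancel, kAt]

lemma pstep_eq_step (L : List (Int × Bool × Bool)) (k : Int) : pstep L k = step L k := by
  induction L with
  | nil => simp [pstep, step, lb_nil, kAt]
  | cons p rest ih =>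
    rcases lt_trichotomy k p.1 with hk | hk | hk
    · have hlb : lb (p :: rest) k = 0 := by rw [lb_cons, if_neg (by omega)]
      simp only [pstep, hlb, step, List.length_cons, kAt, List.getD_cons_zero]
      split_ifs <;>
      solve
        | rfl
        | omega
        | (exfalso; simp_all)
        | simp_all [List.modify_cons, List.insertIdx_succ_cons, List.insertIdx_zero, setL, setR, Nat.add_sub_cancel, kAt]
    · have hlb : lb (p :: rest) k = 0 := by rw [lb_cons, if_neg (by omega)]
      simp only [pstep, hlb, step, List.length_cons, kAt, List.getD_cons_zero]
      split_ifs <;>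
      solve
        | rfl
        | omega
        | (exfalso; simp_all)
        | simp_all [List.modify_cons, List.insertIdx_succ_cons, List.insertIdx_zero, setL, setR, Nat.add_sub_cancel, kAt]
    · have hne : ¬ k = p.1 := by omega
      have hnl : ¬ k < p.1 := by omega
      cases rest with
      | nil =>
        have hlb : lb [p] k = 1 := by rw [lb_cons, if_pos hk]; rfl
        simp only [pstep, hlb, step, stepGo, List.length_cons, List.length_nil,
          kAt, List.getD_cons_succ, List.getD_cons_zero, List.getD_nil,
          if_neg hne, if_neg hnl]
        split_ifs <;>
        solve
        | rfl
        | omega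
        | (exfalso; simp_all)
        | simp_all [List.modify_cons, List.insertIdx_succ_cons, List.insertIdx_zero, setL, setR, Nat.add_sub_cancel, kAt]
      | cons q rs =>
        rcases lt_trichotomy k q.1 with hq | hq | hq
        · have hlb : lb (p :: q :: rs) k = 1 := by
            rw [lb_cons, if_pos hk, lb_cons, if_neg (by omega)]
          simp only [pstep, hlb, step, stepGo, List.length_cons,
            kAt, List.getD_cons_succ, List.getD_cons_zero,
            if_neg hne, if_neg hnl, if_neg (by omega : ¬ k = q.1), if_pos hq]
          split_ifs <;>
          solve
        | rfl
        | omega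
        | (exfalso; simp_all)
        | simp_all [List.modify_cons, List.insertIdx_succ_cons, List.insertIdx_zero, setL, setR, Nat.add_sub_cancel, kAt]
        · have hlb : lb (p :: q :: rs) k = 1 := by
            rw [lb_cons, if_pos hk, lb_cons, if_neg (by omega)]
          simp only [pstep, hlb, step, stepGo, List.length_cons,
            kAt, List.getD_cons_succ, List.getD_cons_zero,
            if_neg hne, if_neg hnl, if_pos hq]
          split_ifs <;>
      solve
        | rfl
        | omega
        | (exfalso; simp_all)
        | simp_all [List.modify_cons, List.insertIdx_succ_cons, List.insertIdx_zero, setL, setR, Nat.add_sub_cancel, kAt]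
        · have hpos : 0 < lb (q :: rs) k := by
            rw [lb_cons, if_pos hq]; omega
          rw [pstep_cons_big p (q :: rs) k hk hpos, ih]
          simp only [step, stepGo]
          split_ifs <;> solve | rfl | omega

lemma sgo_keys (L : List (Int × Bool × Bool)) (k : Int) :
    ∀ p z, z ∈ keysOf (stepGo p L k) → z = k ∨ z = p.1 ∨ z ∈ keysOf L := by
  induction L with
  | nil =>
    intro p z hz
    by_cases hp : p.2.2 <;> simp [stepGo, hp, keysOf, setR] at hz <;> tauto
  | cons q rs ih =>
    intro p z hz
    simp only [stepGo] at hz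
    split_ifs at hz with h1 h2 h3
    · simp [keysOf] at hz ⊢; tauto
    · simp [keysOf, setL] at hz ⊢; tauto
    · simp [keysOf, setR] at hz ⊢; tauto
    · simp only [keysOf, List.map_cons, List.mem_cons] at hz ⊢
      rcases hz with h | h
      · tauto
      · rcases ih q z (by simpa [keysOf] using h) with h' | h' | h' <;>
          simp [keysOf] at h' ⊢ <;> tauto

lemma sgo_sorted (L : List (Int × Bool × Bool)) (k : Int) :
    ∀ p, p.1 < k → (keysOf (p :: L)).Pairwise (· < ·) →
      (keysOf (stepGo p L k)).Pairwise (· < ·) := by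
  induction L with
  | nil =>
    intro p hpk _
    by_cases hp : p.2.2 <;> simp [stepGo, hp, keysOf, setR, hpk]
  | cons q rs ih =>
    intro p hpk hs
    simp only [keysOf, List.map_cons, List.pairwise_cons, List.mem_cons] at hs
    obtain ⟨hp1, hq1, hrs⟩ := hs
    have hpq : p.1 < q.1 := hp1 _ (Or.inl rfl)
    simp only [stepGo]
    split_ifs with h1 h2 h3
    · simp only [keysOf, List.map_cons, List.pairwise_cons, List.mem_cons]
      exact ⟨hp1, hq1, hrs⟩
    · simp only [keysOf, List.map_cons, List.pairwise_cons, List.mem_cons, setL]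
      refine ⟨?_, ?_, hq1, hrs⟩
      · rintro z (rfl | rfl | hz)
        · exact hpk
        · exact hpq
        · exact hp1 _ (Or.inr hz)
      · rintro z (rfl | hz)
        · exact h2
        · exact lt_trans h2 (hq1 _ hz)
    · simp only [keysOf, List.map_cons, List.pairwise_cons, List.mem_cons, setR]
      refine ⟨?_, ?_, hq1, hrs⟩
      · rintro z (rfl | rfl | hz)
        · exact hpk
        · exact hpq
        · exact hp1 _ (Or.inr hz)
      · rintro z (rfl | hz)
        · exact h2
        · exact lt_trans h2 (hq1 _ hz)
    · simp only [keysOf, List.map_cons, List.pairwise_cons]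
      have hq1' : q.1 < k := by omega
      refine ⟨?_, ih q hq1' (by
        simp only [keysOf, List.map_cons, List.pairwise_cons, List.mem_cons]
        exact ⟨hq1, hrs⟩)⟩
      intro z hz
      rcases sgo_keys rs k q z hz with rfl | h' | h'
      · exact hpk
      · rw [h']; exact hpq
      · exact hp1 _ (Or.inr (by simpa [keysOf] using h'))

lemma step_sorted (L : List (Int × Bool × Bool)) (k : Int)
    (hs : (keysOf L).Pairwise (· < ·)) : (keysOf (step L k)).Pairwise (· < ·) := by
  cases L with
  | nil => simp [step, keysOf]
  | cons p rest =>
    simp only [step]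
    split_ifs with h1 h2
    · exact hs
    · simp only [keysOf, List.map_cons, List.pairwise_cons, List.mem_cons, setL] at hs ⊢
      obtain ⟨hp1, hrest⟩ := hs
      refine ⟨?_, hp1, hrest⟩
      rintro z (rfl | hz)
      · exact h2
      · exact lt_trans h2 (hp1 _ hz)
    · exact sgo_sorted rest k p (by omega) hs

-- tree-side lemmas
lemma insert_isNode (t : BTree) (k : Int) : isNode (insertT t k) = true := by
  cases t with
  | leaf => simp [insertT, isNode]
  | node l x r => simp only [insertT]; split_ifs <;> simp [isNode]

lemma flags_last (t : BTree) (h : t ≠ .leaf) :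
    ∃ M u e, flags t = M ++ [(u, e, false)] := by
  induction t with
  | leaf => exact absurd rfl h
  | node l x r ihl ihr =>
    cases r with
    | leaf => exact ⟨flags l, x, isNode l, by simp [flags, isNode]⟩
    | node rl ry rr =>
      obtain ⟨M, u, e, hM⟩ := ihr (by simp)
      refine ⟨flags l ++ (x, isNode l, isNode (BTree.node rl ry rr)) :: M, u, e, ?_⟩
      rw [show flags (BTree.node l x (BTree.node rl ry rr))
            = flags l ++ (x, isNode l, isNode (BTree.node rl ry rr))
              :: flags (BTree.node rl ry rr) from rfl, hM]
      simp

lemma sg_skip_lt (L1 : List (Int × Bool × Bool)) (q : Int × Bool × Bool)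
    (L2 : List (Int × Bool × Bool)) (k : Int)
    (hq : ∀ p ∈ L1, p.1 < k) (hx : q.1 < k) :
    ∀ p, stepGo p (L1 ++ q :: L2) k = p :: L1 ++ stepGo q L2 k := by
  induction L1 with
  | nil =>
    intro p
    simp only [List.nil_append, stepGo]
    rw [if_neg (ne_of_gt hx), if_neg (lt_asymm hx)]
    simp
  | cons w L1' ih =>
    intro p
    have hw : w.1 < k := hq w (by simp)
    simp only [List.cons_append, stepGo]
    rw [if_neg (ne_of_gt hw), if_neg (lt_asymm hw)]
    rw [ih (fun p hp => hq p (by simp [hp])) w]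
    simp

lemma sg_skip_eq (L1 : List (Int × Bool × Bool)) (q : Int × Bool × Bool)
    (L2 : List (Int × Bool × Bool)) (k : Int)
    (hq : ∀ p ∈ L1, p.1 < k) (hx : q.1 = k) :
    ∀ p, stepGo p (L1 ++ q :: L2) k = p :: L1 ++ q :: L2 := by
  induction L1 with
  | nil =>
    intro p
    simp [stepGo, hx.symm]
  | cons w L1' ih =>
    intro p
    have hw : w.1 < k := hq w (by simp)
    simp only [List.cons_append, stepGo]
    rw [if_neg (ne_of_gt hw), if_neg (lt_asymm hw)]
    rw [ih (fun p hp => hq p (by simp [hp])) w]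
    simp

lemma sg_right (p : Int × Bool × Bool) (L2 : List (Int × Bool × Bool)) (k : Int)
    (hp : p.2.2 = true) (hL2 : L2 ≠ []) : stepGo p L2 k = p :: step L2 k := by
  cases L2 with
  | nil => exact absurd rfl hL2
  | cons q rs =>
    simp only [stepGo, step, hp]
    split_ifs <;> rfl

lemma sg_prefix (M : List (Int × Bool × Bool)) (u : Int) (e : Bool)
    (x : Int × Bool × Bool) (L2 : List (Int × Bool × Bool)) (k : Int) (hk : k < x.1) :
    ∀ p, stepGo p ((M ++ [(u, e, false)]) ++ x :: L2) k
      = stepGo p (M ++ [(u, e, false)]) k ++ x :: L2 := by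
  induction M with
  | nil =>
    intro p
    rcases lt_trichotomy k u with hu | hu | hu
    · simp only [List.nil_append, List.cons_append, stepGo]
      rw [if_neg (show ¬ k = (u, e, false).1 from ne_of_lt hu),
        if_pos (show k < (u, e, false).1 from hu),
        if_neg (show ¬ k = (u, e, false).1 from ne_of_lt hu),
        if_pos (show k < (u, e, false).1 from hu)]
      split_ifs <;> simp
    · simp only [List.nil_append, List.cons_append, stepGo]
      rw [if_pos (show k = (u, e, false).1 from hu), if_pos (show k = (u, e, false).1 from hu)]
      simp
    · simp only [List.nil_append, List.cons_append, stepGo]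
      rw [if_neg (show ¬ k = (u, e, false).1 from ne_of_gt hu),
        if_neg (show ¬ k < (u, e, false).1 from lt_asymm hu),
        if_neg (ne_of_lt hk), if_pos hk,
        if_neg (show ¬ k = (u, e, false).1 from ne_of_gt hu),
        if_neg (show ¬ k < (u, e, false).1 from lt_asymm hu)]
      simp [stepGo]
  | cons w M' ih =>
    intro p
    rcases lt_trichotomy k w.1 with hw | hw | hw
    · simp only [List.cons_append, stepGo]
      rw [if_neg (ne_of_lt hw), if_pos hw, if_neg (ne_of_lt hw), if_pos hw]
      split_ifs <;> simp
    · simp only [List.cons_append, stepGo]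
      rw [if_pos hw, if_pos hw]
      simp
    · simp only [List.cons_append, stepGo]
      rw [if_neg (ne_of_gt hw), if_neg (lt_asymm hw),
        if_neg (ne_of_gt hw), if_neg (lt_asymm hw)]
      rw [ih w]
      simp

lemma step_skip (L1 : List (Int × Bool × Bool)) (q : Int × Bool × Bool)
    (L2 : List (Int × Bool × Bool)) (k : Int)
    (hq : ∀ p ∈ L1, p.1 < k) (hx : q.1 ≤ k) :
    step (L1 ++ q :: L2) k = L1 ++ step (q :: L2) k := by
  cases L1 with
  | nil => simp
  | cons v L1' =>
    have hv : v.1 < k := hq v (by simp)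
    simp only [List.cons_append, step]
    rw [if_neg (ne_of_gt hv), if_neg (lt_asymm hv)]
    rcases eq_or_lt_of_le hx with hqk | hqk
    · rw [sg_skip_eq L1' q L2 k (fun p hp => hq p (by simp [hp])) hqk v]
      rw [if_pos hqk.symm]
      simp
    · rw [sg_skip_lt L1' q L2 k (fun p hp => hq p (by simp [hp])) hqk v]
      rw [if_neg (ne_of_gt hqk), if_neg (lt_asymm hqk)]
      simp

lemma step_prefix (L1 : List (Int × Bool × Bool)) (x : Int × Bool × Bool)
    (L2 : List (Int × Bool × Bool)) (k : Int)
    (hlast : ∃ M u e, L1 = M ++ [(u, e, false)]) (hk : k < x.1) :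
    step (L1 ++ x :: L2) k = step L1 k ++ x :: L2 := by
  obtain ⟨M, u, e, rfl⟩ := hlast
  cases M with
  | nil =>
    rcases lt_trichotomy k u with hu | hu | hu
    · simp only [List.nil_append, List.cons_append, step]
      rw [if_neg (show ¬ k = (u, e, false).1 from ne_of_lt hu),
        if_pos (show k < (u, e, false).1 from hu),
        if_neg (show ¬ k = (u, e, false).1 from ne_of_lt hu),
        if_pos (show k < (u, e, false).1 from hu)]
      simp
    · simp only [List.nil_append, List.cons_append, step]
      rw [if_pos (show k = (u, e, false).1 from hu), if_pos (show k = (u, e, false).1 from hu)]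
      simp
    · simp only [List.nil_append, List.cons_append, step, stepGo]
      rw [if_neg (show ¬ k = (u, e, false).1 from ne_of_gt hu),
        if_neg (show ¬ k < (u, e, false).1 from lt_asymm hu),
        if_neg (ne_of_lt hk), if_pos hk,
        if_neg (show ¬ k = (u, e, false).1 from ne_of_gt hu),
        if_neg (show ¬ k < (u, e, false).1 from lt_asymm hu)]
      simp
  | cons w M' =>
    rcases lt_trichotomy k w.1 with hw | hw | hw
    · simp only [List.cons_append, step]
      rw [if_neg (ne_of_lt hw), if_pos hw, if_neg (ne_of_lt hw), if_pos hw]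
      simp
    · simp only [List.cons_append, step]
      rw [if_pos hw, if_pos hw]
      simp
    · simp only [List.cons_append, step]
      rw [if_neg (ne_of_gt hw), if_neg (lt_asymm hw),
        if_neg (ne_of_gt hw), if_neg (lt_asymm hw)]
      rw [show (M' ++ [(u, e, false)]) ++ x :: L2 = M' ++ [(u, e, false)] ++ x :: L2 by simp,
        sg_prefix M' u e x L2 k hk w]

lemma flags_insert (t : BTree) (k : Int)
    (hs : (keysOf (flags t)).Pairwise (· < ·)) :
    flags (insertT t k) = step (flags t) k := by
  induction t with
  | leaf => rfl
  | node l x r ihl ihr =>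
    have hkeys : keysOf (flags (BTree.node l x r))
        = keysOf (flags l) ++ x :: keysOf (flags r) := by
      simp [flags, keysOf]
    rw [hkeys, List.pairwise_append, List.pairwise_cons] at hs
    obtain ⟨hsl, ⟨hxr, hsr⟩, hcross⟩ := hs
    have hlx : ∀ p ∈ flags l, p.1 < x := fun p hp =>
      hcross p.1 (List.mem_map.2 ⟨p, hp, rfl⟩) x (List.mem_cons_self ..)
    rcases lt_trichotomy k x with hk | hk | hk
    · -- k < x : insertion goes to the left subtree
      rw [show insertT (BTree.node l x r) k = BTree.node (insertT l k) x r by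
        simp only [insertT]; rw [if_neg (ne_of_lt hk), if_pos hk]]
      cases l with
      | leaf =>
        rw [show flags (BTree.node BTree.leaf x r)
              = ((x : Int), isNode BTree.leaf, isNode r) :: flags r from rfl]
        simp only [step]
        rw [if_neg (show ¬ k = ((x : Int), isNode BTree.leaf, isNode r).1 from ne_of_lt hk),
          if_pos (show k < ((x : Int), isNode BTree.leaf, isNode r).1 from hk)]
        simp [flags, insertT, isNode, setL]
      | node la ya ra =>
        rw [show flags (BTree.node (BTree.node la ya ra) x r)
              = flags (BTree.node la ya ra)
                ++ ((x : Int), isNode (BTree.node la ya ra), isNode r) :: flags r from rfl]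
        rw [step_prefix (flags (BTree.node la ya ra)) _ (flags r) k
          (flags_last _ (by simp)) (show k < ((x : Int), isNode (BTree.node la ya ra), isNode r).1 from hk)]
        rw [← ihl hsl]
        rw [show flags (BTree.node (insertT (BTree.node la ya ra) k) x r)
              = flags (insertT (BTree.node la ya ra) k)
                ++ ((x : Int), isNode (insertT (BTree.node la ya ra) k), isNode r) :: flags r
            from rfl, insert_isNode]
        rfl
    · -- k = x : the key is already in the tree
      rw [show insertT (BTree.node l x r) k = BTree.node l x r by
        simp only [insertT]; rw [if_pos hk]]
      rw [show flags (BTree.node l x r)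
            = flags l ++ ((x : Int), isNode l, isNode r) :: flags r from rfl]
      rw [step_skip (flags l) _ (flags r) k
        (fun p hp => by rw [hk]; exact hlx p hp)
        (show ((x : Int), isNode l, isNode r).1 ≤ k from le_of_eq hk.symm)]
      simp only [step]
      rw [if_pos (show k = ((x : Int), isNode l, isNode r).1 from hk)]
    · -- k > x : insertion goes to the right subtree
      rw [show insertT (BTree.node l x r) k = BTree.node l x (insertT r k) by
        simp only [insertT]; rw [if_neg (ne_of_gt hk), if_neg (lt_asymm hk)]]
      rw [show flags (BTree.node l x r)
            = flags l ++ ((x : Int), isNode l, isNode r) :: flags r from rfl]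
      rw [step_skip (flags l) _ (flags r) k
        (fun p hp => lt_trans (hlx p hp) hk)
        (show ((x : Int), isNode l, isNode r).1 ≤ k from le_of_lt hk)]
      simp only [step]
      rw [if_neg (show ¬ k = ((x : Int), isNode l, isNode r).1 from ne_of_gt hk),
        if_neg (show ¬ k < ((x : Int), isNode l, isNode r).1 from lt_asymm hk)]
      cases r with
      | leaf => simp [flags, stepGo, isNode, setR, insertT]
      | node rl ry rr =>
        rw [sg_right _ _ k rfl (by simp [flags])]
        rw [← ihr hsr]
        rw [show flags (BTree.node l x (insertT (BTree.node rl ry rr) k))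
              = flags l ++ ((x : Int), isNode l, isNode (insertT (BTree.node rl ry rr) k))
                :: flags (insertT (BTree.node rl ry rr) k)
            from rfl, insert_isNode]
        rfl

lemma collect_eq (t : BTree) :
    collectTwo t = (flags t).filterMap (fun p => if p.2.1 && p.2.2 then some p.1 else none) := by
  induction t with
  | leaf => simp [collectTwo, flags]
  | node l x r ihl ihr =>
    simp only [collectTwo, flags, List.filterMap_append, List.filterMap_cons, ihl, ihr]
    split <;> simp_all

lemma fold_flags (ks : List Int) :
    ∀ t, (keysOf (flags t)).Pairwise (· < ·) →
      flags (ks.foldl insertT t) = ks.foldl step (flags t)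
        ∧ (keysOf (ks.foldl step (flags t))).Pairwise (· < ·) := by
  induction ks with
  | nil => exact fun t ht => ⟨rfl, ht⟩
  | cons k ks ih =>
    intro t ht
    have h1 : flags (insertT t k) = step (flags t) k := flags_insert t k ht
    have h2 : (keysOf (flags (insertT t k))).Pairwise (· < ·) := by
      rw [h1]; exact step_sorted (flags t) k ht
    obtain ⟨ha, hb⟩ := ih (insertT t k) h2
    rw [h1] at ha hb
    exact ⟨by simpa [List.foldl_cons] using ha, by simpa [List.foldl_cons] using hb⟩

lemma fold_bstep (ks : List Int) :
    ∀ L, (keysOf L).Pairwise (· < ·) → ks.foldl bstep L = ks.foldl step L := by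
  induction ks with
  | nil => intro L _; rfl
  | cons k ks ih =>
    intro L hL
    simp only [List.foldl_cons]
    rw [bstep_eq_pstep L k hL, pstep_eq_step]
    exact ih (step L k) (step_sorted L k hL)

-- ===== VERDICT (by name: the statement is the Claim_ definition above) =====
theorem nodes_with_two_children_spec : Claim_equal_nodes_with_two_children := by
  intro keys _
  show _ = _
  have h0 : (keysOf (flags BTree.leaf)).Pairwise (· < ·) := by simp [flags, keysOf]
  have hf := fold_flags keys BTree.leaf h0
  have hb := fold_bstep keys [] (by simp [keysOf])
  unfold nodes_with_two_children nodes_with_two_children_alt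
  rw [collect_eq, hf.1, show flags BTree.leaf = [] from rfl, hb]
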